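-- pv_equiv track=rewrite | github.com/andrewixl/tierzerocode | apps/main/integrations/user_integrations/MicrosoftEntraID.py | determine_authentication_strength
-- ===== SOURCE A (Python) =====
-- AUTHENTICATION_STRENGTHS = {
--     "Phishing Resistant": {'passKeyDeviceBound', 'passKeyDeviceBoundAuthenticator', 'windowsHelloforBusiness'},
--     "Passwordless": {'microsoftAuthenticatorPasswordless'},
--     "MFA": {'microsoftAuthenticatorPush', 'softwareOneTimePasscode', 'temporaryAccessPass'},
--     "Deprecated": {'mobilePhone', 'email', 'securityQuestion'},
--     "None": set()
-- }
--
-- def determine_authentication_strength(auth_method_types):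
--     """Determine the highest and lowest authentication strengths."""
--     highest_strength = "None"
--     lowest_strength = "None"
--
--     for strength, methods in AUTHENTICATION_STRENGTHS.items():
--         if auth_method_types & methods:
--             highest_strength = strength
--             break
--
--     for strength, methods in reversed(AUTHENTICATION_STRENGTHS.items()):
--         if auth_method_types & methods:
--             lowest_strength = strength
--             break
--
--     return highest_strength, lowest_strength
-- ===== SOURCE B (Python) =====
-- AUTHENTICATION_STRENGTHS = {
--     "Phishing Resistant": {'passKeyDeviceBound', 'passKeyDeviceBoundAuthenticator', 'windowsHelloforBusiness'},
--     "Passwordless": {'microsoftAuthenticatorPasswordless'},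
--     "MFA": {'microsoftAuthenticatorPush', 'softwareOneTimePasscode', 'temporaryAccessPass'},
--     "Deprecated": {'mobilePhone', 'email', 'securityQuestion'},
--     "None": set()
-- }
--
-- def determine_authentication_strength(auth_method_types):
--     """Determine the highest and lowest authentication strengths."""
--     matches = []
--     for strength, methods in AUTHENTICATION_STRENGTHS.items():
--         if auth_method_types & methods:
--             matches.append(strength)
--     if matches:
--         return matches[0], matches[-1]
--     return "None", "None"
-- ===== Notes on version B (the rewrite author's own statement) =====
-- stated objective: simpler
-- what changed: Replaces A's two separate early-breaking scans (forward and reversed) over AUTHENTICATION_STRENGTHS by one single pass that collects all matching category names and returns the first and last of that list, with the default pair when nothing matches.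
import Mathlib
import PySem

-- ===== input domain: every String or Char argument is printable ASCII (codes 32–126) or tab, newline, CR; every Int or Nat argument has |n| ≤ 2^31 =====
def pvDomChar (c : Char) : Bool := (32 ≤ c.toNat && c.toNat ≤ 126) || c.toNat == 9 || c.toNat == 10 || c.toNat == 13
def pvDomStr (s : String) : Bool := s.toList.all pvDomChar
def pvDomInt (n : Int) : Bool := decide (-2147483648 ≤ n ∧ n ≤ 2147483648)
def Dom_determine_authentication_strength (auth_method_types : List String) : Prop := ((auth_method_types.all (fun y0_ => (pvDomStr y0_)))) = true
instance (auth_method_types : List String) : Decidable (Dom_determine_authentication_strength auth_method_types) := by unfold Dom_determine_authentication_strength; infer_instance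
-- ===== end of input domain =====

-- B replaces A's two early-breaking scans (forward and reversed) by one pass that
-- collects all matching category names and returns its two ends (objective: simpler).

-- ===== PORT A =====
-- the module constant AUTHENTICATION_STRENGTHS (dict of sets, insertion order)
def pvStrengths : List (String × List String) :=
  [ ("Phishing Resistant", ["passKeyDeviceBound", "passKeyDeviceBoundAuthenticator", "windowsHelloforBusiness"]),
    ("Passwordless", ["microsoftAuthenticatorPasswordless"]),
    ("MFA", ["microsoftAuthenticatorPush", "softwareOneTimePasscode", "temporaryAccessPass"]),
    ("Deprecated", ["mobilePhone", "email", "securityQuestion"]),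
    ("None", []) ]

-- truthiness of `auth_method_types & methods` (non-empty set intersection)
def pvInter (xs methods : List String) : Bool := xs.any (fun m => methods.contains m)

-- A's `for … : if …: strength; break` loop with default "None"
def pvFirstMatch : List (String × List String) → List String → String
  | [], _ => "None"
  | (s, ms) :: rest, xs => if pvInter xs ms then s else pvFirstMatch rest xs

def determine_authentication_strength (auth_method_types : List String) : String × String :=
  (pvFirstMatch pvStrengths auth_method_types,
   pvFirstMatch pvStrengths.reverse auth_method_types)

-- ===== PORT B =====
def determine_authentication_strength_alt (auth_method_types : List String) : String × String :=
  let hits := pvStrengths.foldl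
    (fun acc p => if pvInter auth_method_types p.2 then acc ++ [p.1] else acc) []
  match hits with
  | [] => ("None", "None")
  | m :: _ => (m, hits.getLast!)

-- ===== PRECONDITION & SPEC =====
def Spec_determine_authentication_strength (auth_method_types : List String) (out : String × String) : Prop := out = determine_authentication_strength_alt auth_method_types
instance (auth_method_types : List String) (out : String × String) : Decidable (Spec_determine_authentication_strength auth_method_types out) := by unfold Spec_determine_authentication_strength; infer_instance

-- ===== CLAIM (what is proved, stated in full; the proofs are below) =====
def Claim_equal_determine_authentication_strength : Prop := ∀ (auth_method_types : List String), Dom_determine_authentication_strength auth_method_types → Spec_determine_authentication_strength auth_method_types (determine_authentication_strength auth_method_types)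

-- ===== LEMMAS AND PROOFS =====
theorem pvInter_nil (xs : List String) : pvInter xs [] = false := by
  simp [pvInter]

-- ===== VERDICT (by name: the statement is the Claim_ definition above) =====
theorem determine_authentication_strength_spec : Claim_equal_determine_authentication_strength := by
  intro xs _
  show _ = _
  unfold determine_authentication_strength determine_authentication_strength_alt
  cases h1 : pvInter xs ["passKeyDeviceBound", "passKeyDeviceBoundAuthenticator", "windowsHelloforBusiness"] <;>
  cases h2 : pvInter xs ["microsoftAuthenticatorPasswordless"] <;>
  cases h3 : pvInter xs ["microsoftAuthenticatorPush", "softwareOneTimePasscode", "temporaryAccessPass"] <;>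
  cases h4 : pvInter xs ["mobilePhone", "email", "securityQuestion"] <;>
  simp [pvStrengths, pvFirstMatch, List.foldl, h1, h2, h3, h4, pvInter_nil, List.getLast!]
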